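-- pv_equiv track=rewrite | github.com/manv-lang/manv | manv/semantics.py | normalize_type_name
-- ===== SOURCE A (Python) =====
-- def normalize_type_name(type_name: str | None) -> str | None:
--     """Normalize user-facing type aliases into the internal semantic surface.
--
--     Why this exists:
--     - The current language still accepts legacy `int`/`float` names.
--     - GPU eligibility wants deterministic scalar names (`i32`, `f32`).
--     - The new `T[]` syntax should lower to the same internal array type form
--       as existing `array[T]` annotations.
--     """
--
--     if type_name is None:
--         return None
--
--     text = type_name.strip()
--     array_depth = 0
--     while text.endswith("[]"):
--         array_depth += 1
--         text = text[:-2].strip()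
--
--     base = {
--         "int": "i32",
--         "float": "f32",
--         "void": "none",
--     }.get(text, text)
--
--     for _ in range(array_depth):
--         base = f"array[{base}]"
--     return base
-- ===== SOURCE B (Python) =====
-- _SCALARS = {"int": "i32", "float": "f32", "void": "none"}
--
--
-- def normalize_type_name(type_name):
--     """Recursive normalization: peel one '[]' suffix at a time."""
--     if type_name is None:
--         return None
--     text = type_name.strip()
--     if text.endswith("[]"):
--         return f"array[{normalize_type_name(text[:-2])}]"
--     return _SCALARS.get(text, text)
-- ===== Notes on version B (the rewrite author's own statement) =====
-- stated objective: simpler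
-- what changed: Replaced A's depth-counting while-loop plus a second re-wrapping loop with a single structural recursion that peels one array suffix at a time and wraps the recursive result, mapping scalar aliases only at the base case.
import Mathlib
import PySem

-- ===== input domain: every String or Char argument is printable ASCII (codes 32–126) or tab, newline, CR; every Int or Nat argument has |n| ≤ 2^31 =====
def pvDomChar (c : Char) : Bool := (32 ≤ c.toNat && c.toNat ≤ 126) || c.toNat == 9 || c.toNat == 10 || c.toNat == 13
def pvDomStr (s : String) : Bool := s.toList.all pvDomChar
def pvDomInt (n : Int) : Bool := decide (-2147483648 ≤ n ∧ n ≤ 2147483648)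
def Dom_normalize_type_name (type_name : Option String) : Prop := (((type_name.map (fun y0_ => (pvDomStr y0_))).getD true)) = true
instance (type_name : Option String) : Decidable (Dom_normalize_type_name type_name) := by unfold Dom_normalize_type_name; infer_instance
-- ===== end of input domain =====

-- B replaces A's depth-counting loop + re-wrapping loop by one structural recursion over the array suffixes (objective: simpler).


-- strip never lengthens a string (used for termination of both loops)
theorem pvStripLen (s : List Char) : (PySem.Chars.strip s).length ≤ s.length := by
  have h1 : (PySem.Chars.lstrip s).length ≤ s.length := by
    simpa [PySem.Chars.lstrip] using (List.dropWhile_sublist (l := s) (p := PySem.Chars.isspace)).length_le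
  have h2 : (PySem.Chars.rstrip (PySem.Chars.lstrip s)).length ≤ (PySem.Chars.lstrip s).length := by
    simpa [PySem.Chars.rstrip] using
      (List.dropWhile_sublist (l := (PySem.Chars.lstrip s).reverse) (p := PySem.Chars.isspace)).length_le
  exact le_trans h2 h1

-- endswith "[]" forces length ≥ 2
theorem pvEndsTwo {t : List Char} (h : PySem.Chars.endswith t ['[', ']'] = true) : 2 ≤ t.length := by
  have := (PySem.Chars.endswith_iff (s := t) (p := ['[', ']'])).1 h
  simpa using this.length_le

-- ===== PORT A =====
-- the while loop of A: strip off '[]' suffixes counting the depth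
def pvALoop (text : List Char) (depth : Nat) : List Char × Nat :=
  if h : PySem.Chars.endswith text ['[', ']'] = true then
    pvALoop (PySem.Chars.strip (PySem.List.slice text none (some (-2)))) (depth + 1)
  else (text, depth)
termination_by text.length
decreasing_by
  have h2 := pvEndsTwo h
  have := pvStripLen (PySem.List.slice text none (some (-2)))
  rw [PySem.List.slice_to_neg_ofNat text 2 (by omega)] at this ⊢
  simp at this ⊢
  omega

-- the for loop of A: wrap depth times
def pvAWrap (base : List Char) : Nat → List Char
  | 0 => base
  | n + 1 => pvAWrap ("array[".toList ++ base ++ [']']) n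

def pvBase (text : List Char) : List Char :=
  if text = "int".toList then "i32".toList
  else if text = "float".toList then "f32".toList
  else if text = "void".toList then "none".toList
  else text

def normalize_type_name (type_name : Option String) : Option String :=
  match type_name with
  | none => none
  | some s =>
    let r := pvALoop (PySem.Chars.strip s.toList) 0
    some (String.ofList (pvAWrap (pvBase r.1) r.2))

-- ===== PORT B =====
-- structural recursion of Source B, on code points
def pvBRec (s : List Char) : List Char :=
  if h : PySem.Chars.endswith (PySem.Chars.strip s) ['[', ']'] = true then
    "array[".toList ++ pvBRec (PySem.List.slice (PySem.Chars.strip s) none (some (-2))) ++ [']']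
  else pvBase (PySem.Chars.strip s)
termination_by s.length
decreasing_by
  have h2 := pvEndsTwo h
  have hs := pvStripLen s
  rw [PySem.List.slice_to_neg_ofNat _ 2 (by omega)]
  simp
  omega

def normalize_type_name_alt (type_name : Option String) : Option String :=
  match type_name with
  | none => none
  | some s => some (String.ofList (pvBRec s.toList))

-- ===== PRECONDITION & SPEC =====
def Spec_normalize_type_name (type_name : Option String) (out : Option String) : Prop := out = normalize_type_name_alt type_name
instance (type_name : Option String) (out : Option String) : Decidable (Spec_normalize_type_name type_name out) := by unfold Spec_normalize_type_name; infer_instance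

-- ===== CLAIM (what is proved, stated in full; the proofs are below) =====
def Claim_equal_normalize_type_name : Prop := ∀ (type_name : Option String), Dom_normalize_type_name type_name → Spec_normalize_type_name type_name (normalize_type_name type_name)

-- ===== LEMMAS AND PROOFS =====
theorem pvAWrap_succ (base : List Char) (n : Nat) :
    pvAWrap base (n + 1) = "array[".toList ++ pvAWrap base n ++ [']'] := by
  induction n generalizing base with
  | zero => simp [pvAWrap]
  | succ k ih => rw [pvAWrap, ih, pvAWrap]

theorem pvSliceLen (t : List Char) (h : PySem.Chars.endswith t ['[', ']'] = true) :
    (PySem.List.slice t none (some (-2))).length = t.length - 2 := by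
  have h2 := pvEndsTwo h
  rw [PySem.List.slice_to_neg_ofNat t 2 (by omega)]
  simp

theorem pvALoop_shift : ∀ (n : Nat) (text : List Char), text.length ≤ n → ∀ d : Nat,
    pvALoop text d = ((pvALoop text 0).1, d + (pvALoop text 0).2) := by
  intro n
  induction n with
  | zero =>
    intro t ht d
    by_cases h : PySem.Chars.endswith t ['[', ']'] = true
    · exact absurd (pvEndsTwo h) (by omega)
    · conv_lhs => rw [pvALoop]
      conv_rhs => rw [pvALoop]
      simp [h]
  | succ k ih =>
    intro t ht d
    by_cases h : PySem.Chars.endswith t ['[', ']'] = true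
    · have hlt : (PySem.Chars.strip (PySem.List.slice t none (some (-2)))).length ≤ k := by
        have := pvStripLen (PySem.List.slice t none (some (-2)))
        have := pvSliceLen t h
        have := pvEndsTwo h
        omega
      conv_lhs => rw [pvALoop]
      conv_rhs => rw [pvALoop]
      simp only [h, dite_true]
      rw [ih _ hlt (d + 1), ih _ hlt 1]
      simp [Nat.add_assoc]
    · conv_lhs => rw [pvALoop]
      conv_rhs => rw [pvALoop]
      simp [h]

theorem pvBRec_eq_aux : ∀ (n : Nat) (s : List Char), s.length ≤ n →
    pvBRec s = pvAWrap (pvBase (pvALoop (PySem.Chars.strip s) 0).1) (pvALoop (PySem.Chars.strip s) 0).2 := by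
  intro n
  induction n with
  | zero =>
    intro s hs
    by_cases h : PySem.Chars.endswith (PySem.Chars.strip s) ['[', ']'] = true
    · have := pvEndsTwo h
      have := pvStripLen s
      omega
    · conv_lhs => rw [pvBRec]
      conv_rhs => rw [pvALoop]
      simp [h, pvAWrap]
  | succ k ih =>
    intro s hs
    by_cases h : PySem.Chars.endswith (PySem.Chars.strip s) ['[', ']'] = true
    · have hle : (PySem.List.slice (PySem.Chars.strip s) none (some (-2))).length ≤ k := by
        have := pvSliceLen (PySem.Chars.strip s) h
        have := pvStripLen s
        have := pvEndsTwo h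
        omega
      conv_lhs => rw [pvBRec]
      conv_rhs => rw [pvALoop]
      simp only [h, dite_true]
      rw [ih _ hle]
      rw [pvALoop_shift (PySem.Chars.strip (PySem.List.slice (PySem.Chars.strip s) none (some (-2)))).length _ le_rfl 1]
      rw [Nat.add_comm 1, pvAWrap_succ]
    · conv_lhs => rw [pvBRec]
      conv_rhs => rw [pvALoop]
      simp [h, pvAWrap]

theorem pvBRec_eq (s : List Char) :
    pvBRec s = pvAWrap (pvBase (pvALoop (PySem.Chars.strip s) 0).1) (pvALoop (PySem.Chars.strip s) 0).2 := by
  exact pvBRec_eq_aux s.length s le_rfl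

-- ===== VERDICT (by name: the statement is the Claim_ definition above) =====
theorem normalize_type_name_spec : Claim_equal_normalize_type_name := by
  intro type_name _
  unfold Spec_normalize_type_name normalize_type_name normalize_type_name_alt
  cases type_name with
  | none => rfl
  | some s => simp [pvBRec_eq]
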